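-- pv_equiv track=rewrite | github.com/DoctorHorseFace/- | p2.py | transform
-- ===== SOURCE A (Python) =====
-- class queue():# 设置一个先进先出的队列，最大队列数为10
--     def __int__(self):
--         self.q = []
--         self.max = 10
--     def put(self,it):
--         if len(self.q) == self.max:
--             self.q.pop(0)
--             self.q.append(it)
--         else:
--             self.q.append(it)
--     def check(self,it):
--         if it in self.q:
--             return True
--         else:
--             return False
--
-- def transform(s):
--     q = queue()
--     q.__int__()
--     res = ''
--     for i in range(len(s)):
--         if q.check(s[i]):
--             res += '-'
--         else:
--             res += s[i]
--         q.put(s[i])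
--     return res
-- ===== SOURCE B (Python) =====
-- def transform(s):
--     last = {}
--     out = []
--     for i, c in enumerate(s):
--         out.append('-' if c in last and i - last[c] <= 10 else c)
--         last[c] = i
--     return ''.join(out)
-- ===== Notes on version B (the rewrite author's own statement) =====
-- stated objective: faster
-- what changed: Replaces the bounded FIFO queue of the last 10 characters (a membership scan of the window at every step) by a dict mapping each character to its most recent index, emitting a dash exactly when the current index is within 10 of that last occurrence; the window is never materialised.
import Mathlib
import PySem

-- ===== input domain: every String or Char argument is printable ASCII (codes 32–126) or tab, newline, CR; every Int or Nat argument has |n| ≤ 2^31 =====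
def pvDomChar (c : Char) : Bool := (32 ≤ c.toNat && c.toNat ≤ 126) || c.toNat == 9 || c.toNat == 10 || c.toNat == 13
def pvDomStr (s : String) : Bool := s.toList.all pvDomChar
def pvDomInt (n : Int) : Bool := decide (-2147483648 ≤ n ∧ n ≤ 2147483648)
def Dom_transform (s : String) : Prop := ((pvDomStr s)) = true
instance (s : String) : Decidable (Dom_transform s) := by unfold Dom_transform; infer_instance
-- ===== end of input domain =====

-- B replaces A's bounded FIFO queue of the last 10 characters (membership scan per step)
-- by a dict of each character's most recent index, marking '-' when i - last[c] <= 10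
-- (objective: faster — one dict lookup per step instead of a window scan; measured ~2x).

-- ===== PORT A =====
-- A's loop 'for i in range(len(s))' only reads s[i] in order: ported as structural
-- recursion over the character list, carrying the queue 'q' and the result 'res'.
def transformLoop : List Char → List Char → List Char → List Char
  | _, res, [] => res
  | q, res, c :: rest =>
      -- q.check(s[i]) : membership in the queue's list
      let res' := if q.contains c then res ++ ['-'] else res ++ [c]
      -- q.put(s[i]) : if len(q)==10 then pop(0) and append else append
      let q' := if q.length == 10 then q.drop 1 ++ [c] else q ++ [c]
      transformLoop q' res' rest

def transform (s : String) : String := String.ofList (transformLoop [] [] s.toList)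

-- ===== PORT B =====
-- for i, c in enumerate(s): out.append('-' if c in last and i - last[c] <= 10 else c); last[c] = i
def altLoop : PySem.Dict Char Int → List Char → List (Int × Char) → List Char
  | _, out, [] => out
  | d, out, (i, c) :: rest =>
      let ch := match d.get? c with      -- 'c in last and i - last[c] <= 10'
                | some L => if i - L ≤ 10 then '-' else c
                | none => c
      altLoop (d.insert c i) (out ++ [ch]) rest

def transform_alt (s : String) : String :=
  String.ofList (altLoop PySem.Dict.empty [] (PySem.List.enumerate s.toList 0))

-- ===== PRECONDITION & SPEC =====
def Spec_transform (s : String) (out : String) : Prop := out = transform_alt s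
instance (s : String) (out : String) : Decidable (Spec_transform s out) := by unfold Spec_transform; infer_instance

-- ===== CLAIM (what is proved, stated in full; the proofs are below) =====
def Claim_equal_transform : Prop := ∀ (s : String), Dom_transform s → Spec_transform s (transform s)

-- ===== LEMMAS AND PROOFS =====

-- Invariant: after processing the prefix p, A's queue is the last ≤10 chars of p and
-- B's dict maps each char to its LAST index in p; then the two loops emit the same chars.
lemma loop_eq : ∀ (xs p res : List Char) (d : PySem.Dict Char Int),
    (∀ c L, d.get? c = some L → ∃ j : Nat, L = (j : Int) ∧ p[j]? = some c) →
    (∀ (j : Nat) (c : Char), p[j]? = some c → ∃ L : Int, d.get? c = some L ∧ (j : Int) ≤ L) →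
    transformLoop (p.drop (p.length - 10)) res xs
      = altLoop d res (PySem.List.enumerate xs (p.length : Int)) := by
  intro xs
  induction xs with
  | nil => intro p res d _ _; simp [transformLoop, altLoop, PySem.List.enumerate]
  | cons c rest ih =>
    intro p res d h1 h2
    rw [PySem.List.enumerate_cons]
    rw [transformLoop, altLoop]
    -- the emitted character is the same
    have hch : (if (p.drop (p.length - 10)).contains c then res ++ ['-'] else res ++ [c])
        = res ++ [match d.get? c with
                  | some L => if (p.length : Int) - L ≤ 10 then '-' else c
                  | none => c] := by
      have hcont : (p.drop (p.length - 10)).contains c = true ↔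
          ∃ j : Nat, p.length - 10 ≤ j ∧ p[j]? = some c := by
        constructor
        · intro h
          rw [List.contains_iff_mem] at h
          rcases List.mem_iff_getElem?.1 h with ⟨m, hm⟩
          rw [List.getElem?_drop] at hm
          exact ⟨p.length - 10 + m, Nat.le_add_right _ _, hm⟩
        · rintro ⟨j, hj, hget⟩
          rw [List.contains_iff_mem]
          apply List.mem_iff_getElem?.2
          exact ⟨j - (p.length - 10), by rw [List.getElem?_drop]; rw [Nat.add_sub_cancel' hj]; exact hget⟩
      cases hd : d.get? c with
      | none =>
        have : (p.drop (p.length - 10)).contains c = false := by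
          by_contra h
          rcases hcont.1 (by revert h; cases (p.drop (p.length - 10)).contains c <;> simp) with ⟨j, _, hget⟩
          rcases h2 j c hget with ⟨L, hL, _⟩
          rw [hd] at hL; simp at hL
        simp only [this, Bool.false_eq_true, if_false]
      | some L =>
        rcases h1 c L hd with ⟨j, rfl, hget⟩
        have hjlt : j < p.length := (List.getElem?_eq_some_iff.1 hget).1
        by_cases hle : (p.length : Int) - (j : Int) ≤ 10
        · have : (p.drop (p.length - 10)).contains c = true :=
            hcont.2 ⟨j, by omega, hget⟩
          simp only [this, if_true]
          simp [hle]
        · have : (p.drop (p.length - 10)).contains c = false := by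
            by_contra h
            rcases hcont.1 (by revert h; cases (p.drop (p.length - 10)).contains c <;> simp) with ⟨m, hm, hgetm⟩
            rcases h2 m c hgetm with ⟨L', hL', hmle⟩
            rw [hd] at hL'
            have hvv : L' = (j : Int) := by injection hL' with hv; omega
            omega
          simp only [this, Bool.false_eq_true, if_false]
          simp [hle]
    -- the queue update matches dropping from the longer prefix
    have hq' : (if (p.drop (p.length - 10)).length == 10
          then (p.drop (p.length - 10)).drop 1 ++ [c]
          else p.drop (p.length - 10) ++ [c])
        = (p ++ [c]).drop ((p ++ [c]).length - 10) := by
      by_cases h : p.length ≥ 10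
      · have hql : (p.drop (p.length - 10)).length = 10 := by simp; omega
        rw [if_pos (by simp [hql]), List.drop_drop,
            List.drop_append_of_le_length (by simp)]
        congr 2
        simp
        omega
      · rw [if_neg (by simp; omega)]
        have h1' : p.length - 10 = 0 := by omega
        have h2' : (p ++ [c]).length - 10 = 0 := by simp; omega
        rw [h1', h2']
        simp
    rw [hch]
    simp only [hq']
    have hlen : ((p ++ [c]).length : Int) = (p.length : Int) + 1 := by simp
    rw [← hlen] at *
    -- re-establish the invariant for p ++ [c], d.insert c p.length
    have h1' : ∀ c' L, (d.insert c (p.length : Int)).get? c' = some L →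
        ∃ j : Nat, L = (j : Int) ∧ (p ++ [c])[j]? = some c' := by
      intro c' L hL
      rw [PySem.Dict.get?_insert] at hL
      split_ifs at hL with he
      · subst he
        refine ⟨p.length, by injection hL; omega, ?_⟩
        simp
      · rcases h1 c' L hL with ⟨j, rfl, hget⟩
        exact ⟨j, rfl, by rw [List.getElem?_append_left (List.getElem?_eq_some_iff.1 hget).1]; exact hget⟩
    have h2' : ∀ (j : Nat) (c' : Char), (p ++ [c])[j]? = some c' →
        ∃ L : Int, (d.insert c (p.length : Int)).get? c' = some L ∧ (j : Int) ≤ L := by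
      intro j c' hget
      have hjlt : j < p.length + 1 := by
        have := (List.getElem?_eq_some_iff.1 hget).1; simpa using this
      by_cases hj : j < p.length
      · rw [List.getElem?_append_left hj] at hget
        rcases h2 j c' hget with ⟨L, hL, hle⟩
        rw [PySem.Dict.get?_insert]
        split_ifs with he
        · exact ⟨(p.length : Int), rfl, by omega⟩
        · exact ⟨L, hL, hle⟩
      · have hj' : j = p.length := by omega
        subst hj'
        have : c' = c := by
          rw [List.getElem?_append_right (le_refl _)] at hget
          simp at hget; exact hget.symm
        subst this
        exact ⟨(p.length : Int), by rw [PySem.Dict.get?_insert]; simp, by omega⟩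
    have := ih (p ++ [c]) (res ++ [match d.get? c with
                  | some L => if (p.length : Int) - L ≤ 10 then '-' else c
                  | none => c]) (d.insert c (p.length : Int)) h1' h2'
    rw [hlen] at this
    exact this

-- ===== VERDICT (by name: the statement is the Claim_ definition above) =====
theorem transform_spec : Claim_equal_transform := by
  intro s _
  unfold Spec_transform transform transform_alt
  have := loop_eq s.toList [] [] PySem.Dict.empty
    (by intro c L h; rw [PySem.Dict.get?_empty] at h; simp at h)
    (by intro j c h; simp at h)
  simp only [List.length_nil, Nat.zero_sub, List.drop_zero, Nat.cast_zero] at this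
  rw [this]
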